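-- pv_equiv track=rewrite | github.com/to-be-pass/python-coding-test | src/BGM-109/ch_07/solution_016.py | solution
-- ===== SOURCE A (Python) =====
-- from collections import deque
-- import math
--
-- def solution(progresses, speeds):
--     # 예상 작업 기간 리스트
--     days = [math.ceil((100 - p) / s)for p, s in zip(progresses, speeds)]
--
--     # 큐
--     q = deque(days)
--     # 배포 전 완료 데이터를 담는 리스트
--     stack = []
--     # 결과
--     result = []
--
--    # 예상 작업 기간 리스트를 전부 확인한다
--     while q:
--         stack.append(q.popleft())
--         # popleft 후에 인덱스 에러가 발생한다.
--        # 인덱스 에러 때문에 브레이크문을 넣어준다.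
--         if len(q) == 0:
--             result.append(len(stack))
--             break
--         elif stack[-1] < q[0]:
--             result.append(len(stack))
--             stack = []
--         else:
--             continue
--
--     return result
-- ===== SOURCE B (Python) =====
-- import math
--
-- def solution(progresses, speeds):
--     days = [math.ceil((100 - p) / s) for p, s in zip(progresses, speeds)]
--     if not days:
--         return []
--     boundaries = ([0]
--                   + [i + 1 for i in range(len(days) - 1) if days[i] < days[i + 1]]
--                   + [len(days)])
--     return [boundaries[j + 1] - boundaries[j] for j in range(len(boundaries) - 1)]
-- ===== Notes on version B (the rewrite author's own statement) =====
-- stated objective: simpler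
-- what changed: Replaced A's deque/stack accumulation loop with a two-stage table: collect the break positions (indices where days ascends) into a boundary list and return consecutive differences as the batch sizes.
import Mathlib
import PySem

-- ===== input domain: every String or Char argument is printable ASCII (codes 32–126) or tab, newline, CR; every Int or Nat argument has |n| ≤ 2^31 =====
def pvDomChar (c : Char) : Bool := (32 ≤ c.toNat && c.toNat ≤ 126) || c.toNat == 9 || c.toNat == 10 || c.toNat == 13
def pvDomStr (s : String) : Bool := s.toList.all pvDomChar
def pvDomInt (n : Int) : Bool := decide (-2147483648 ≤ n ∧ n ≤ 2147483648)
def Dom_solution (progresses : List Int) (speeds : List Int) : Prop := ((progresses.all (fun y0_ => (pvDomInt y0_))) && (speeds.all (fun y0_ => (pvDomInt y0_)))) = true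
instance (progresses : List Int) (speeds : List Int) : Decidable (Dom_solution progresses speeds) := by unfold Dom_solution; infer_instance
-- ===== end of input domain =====

-- B replaces A's deque/stack accumulation loop with boundary positions + consecutive differences (objective: simpler).

-- ===== PORT A =====
-- math.ceil((100-p)/s): on Dom (|100-p| < 2^32, |s| ≤ 2^31, s ≠ 0) the IEEE double
-- division (100-p)/s never rounds across (or onto) an integer — that would need
-- |s|·k > 2^52 for a quotient magnitude k while |100-p| < 2^32 — so its ceil equals
-- the exact rational ceil, i.e. -((-(100-p)) // s) with Python floor division.
-- pvCeilDiv is exact on that domain (s = 0 is excluded by Pre_solution).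
def pvCeilDiv (a : Int) (b : Int) : Int := -(PySem.Int.floordiv (-a) b)

-- days = [math.ceil((100 - p) / s) for p, s in zip(progresses, speeds)]  (shared by both sources verbatim)
def pvDays (progresses : List Int) (speeds : List Int) : List Int :=
  (progresses.zip speeds).map (fun ps => pvCeilDiv (100 - ps.1) ps.2)

-- A's while-loop over the deque q, carrying stack and result
def pvLoopA : List Int → List Int → List Int → List Int
  | [], _, result => result
  | [d], stack, result => result ++ [(((stack ++ [d]).length : Nat) : Int)]
  | d :: d2 :: t, stack, result =>
    if d < d2 then pvLoopA (d2 :: t) [] (result ++ [(((stack ++ [d]).length : Nat) : Int)])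
    else pvLoopA (d2 :: t) (stack ++ [d]) result

def solution (progresses : List Int) (speeds : List Int) : List Int :=
  pvLoopA (pvDays progresses speeds) [] []

-- ===== PORT B =====
def solution_alt (progresses : List Int) (speeds : List Int) : List Int :=
  let days := pvDays progresses speeds
  if days = [] then []
  else
    let n := days.length
    let boundaries : List Int :=
      [0]
      ++ ((List.range (n - 1)).filterMap (fun i =>
            if days.getD i 0 < days.getD (i + 1) 0 then some ((i : Int) + 1) else none))
      ++ [(n : Int)]
    (List.range (boundaries.length - 1)).map
      (fun j => boundaries.getD (j + 1) 0 - boundaries.getD j 0)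

-- ===== PRECONDITION & SPEC =====
-- Pre_ excludes exactly the inputs where Python A raises ZeroDivisionError: a zero speed within the zipped prefix.
def Pre_solution (progresses : List Int) (speeds : List Int) : Prop :=
  ∀ ps ∈ progresses.zip speeds, ps.2 ≠ 0
instance (progresses : List Int) (speeds : List Int) : Decidable (Pre_solution progresses speeds) := by unfold Pre_solution; infer_instance

def pvWitness_solution : List Int × List Int := ([93, 30, 55], [1, 30, 5])

def Spec_solution (progresses : List Int) (speeds : List Int) (out : List Int) : Prop := out = solution_alt progresses speeds
instance (progresses : List Int) (speeds : List Int) (out : List Int) : Decidable (Spec_solution progresses speeds out) := by unfold Spec_solution; infer_instance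

-- ===== CLAIM (what is proved, stated in full; the proofs are below) =====
def Claim_equal_solution : Prop := ∀ (progresses : List Int) (speeds : List Int), Dom_solution progresses speeds → Pre_solution progresses speeds → Spec_solution progresses speeds (solution progresses speeds)

-- ===== LEMMAS AND PROOFS =====

-- shared mathematical skeleton: segment lengths, break positions, consecutive differences
def pvGrp : List Int → Int → List Int
  | [], _ => []
  | [_], c => [c + 1]
  | d :: d2 :: t, c => if d < d2 then (c + 1) :: pvGrp (d2 :: t) 0 else pvGrp (d2 :: t) (c + 1)

def pvAsc : Int → List Int → List Int
  | _, [] => []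
  | _, [_] => []
  | off, d :: d2 :: t => (if d < d2 then [off + 1] else []) ++ pvAsc (off + 1) (d2 :: t)

def pvDiffs : Int → List Int → List Int
  | _, [] => []
  | prev, b :: bs => (b - prev) :: pvDiffs b bs

theorem pvLoopA_eq_grp (q : List Int) : ∀ (stack result : List Int),
    pvLoopA q stack result = result ++ pvGrp q (stack.length : Int) := by
  induction q with
  | nil => intro stack result; simp [pvLoopA, pvGrp]
  | cons d rest ih =>
    intro stack result
    cases rest with
    | nil => simp [pvLoopA, pvGrp]
    | cons d2 t =>
      have hlen : (((stack ++ [d]).length : Nat) : Int) = (stack.length : Int) + 1 := by simp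
      by_cases h : d < d2
      · rw [show pvLoopA (d :: d2 :: t) stack result
              = pvLoopA (d2 :: t) [] (result ++ [(((stack ++ [d]).length : Nat) : Int)]) from by
            simp [pvLoopA, h]]
        rw [ih, show pvGrp (d :: d2 :: t) (stack.length : Int)
              = ((stack.length : Int) + 1) :: pvGrp (d2 :: t) 0 from by simp [pvGrp, h]]
        simp
      · rw [show pvLoopA (d :: d2 :: t) stack result
              = pvLoopA (d2 :: t) (stack ++ [d]) result from by simp [pvLoopA, h]]
        rw [ih, show pvGrp (d :: d2 :: t) (stack.length : Int)
              = pvGrp (d2 :: t) ((stack.length : Int) + 1) from by simp [pvGrp, h]]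
        rw [hlen]

theorem pvGrp_eq_diffs (l : List Int) : ∀ (off c : Int), l ≠ [] →
    pvGrp l c = pvDiffs (off - c) (pvAsc off l ++ [off + (l.length : Int)]) := by
  induction l with
  | nil => intro _ _ h; exact absurd rfl h
  | cons d rest ih =>
    intro off c _
    cases rest with
    | nil => simp [pvGrp, pvAsc, pvDiffs]; ring
    | cons d2 t =>
      have hL : off + (((d :: d2 :: t).length : Nat) : Int)
          = (off + 1) + (((d2 :: t).length : Nat) : Int) := by
        simp [List.length_cons]; ring
      by_cases h : d < d2
      · rw [show pvGrp (d :: d2 :: t) c = (c + 1) :: pvGrp (d2 :: t) 0 from by simp [pvGrp, h],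
            show pvAsc off (d :: d2 :: t) = (off + 1) :: pvAsc (off + 1) (d2 :: t) from by
              simp [pvAsc, h]]
        rw [List.cons_append, pvDiffs, hL, ih (off + 1) 0 (by simp), sub_zero,
            show off + 1 - (off - c) = c + 1 from by ring]
      · rw [show pvGrp (d :: d2 :: t) c = pvGrp (d2 :: t) (c + 1) from by simp [pvGrp, h],
            show pvAsc off (d :: d2 :: t) = pvAsc (off + 1) (d2 :: t) from by simp [pvAsc, h]]
        rw [hL, ih (off + 1) (c + 1) (by simp),
            show off + 1 - (c + 1) = off - c from by ring]

theorem pvAsc_bridge (l : List Int) : ∀ (off : Int),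
    (List.range (l.length - 1)).filterMap (fun i =>
        if l.getD i 0 < l.getD (i + 1) 0 then some (off + (i : Int) + 1) else none)
      = pvAsc off l := by
  induction l with
  | nil => intro off; simp [pvAsc]
  | cons d rest ih =>
    intro off
    cases rest with
    | nil => simp [pvAsc]
    | cons d2 t =>
      have hlen : (d :: d2 :: t).length - 1 = t.length + 1 := by simp
      rw [hlen, List.range_succ_eq_map, List.filterMap_cons, List.filterMap_map]
      have hfun : ((fun i =>
          if (d :: d2 :: t).getD i 0 < (d :: d2 :: t).getD (i + 1) 0 then some (off + (i : Int) + 1) else none) ∘ Nat.succ)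
          = (fun i => if (d2 :: t).getD i 0 < (d2 :: t).getD (i + 1) 0 then some ((off + 1) + (i : Int) + 1) else none) := by
        funext i
        simp only [Function.comp, Nat.succ_eq_add_one, List.getD_cons_succ]
        split_ifs <;> simp <;> push_cast <;> ring
      rw [hfun]
      have ht : (d2 :: t).length - 1 = t.length := by simp
      have := ih (off + 1)
      rw [ht] at this
      rw [this]
      simp only [pvAsc, List.getD_cons_zero, List.getD_cons_succ]
      split_ifs <;> simp

theorem pvDiffs_bridge (rest : List Int) : ∀ (prev : Int),
    (List.range ((prev :: rest).length - 1)).map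
        (fun j => (prev :: rest).getD (j + 1) 0 - (prev :: rest).getD j 0)
      = pvDiffs prev rest := by
  induction rest with
  | nil => intro prev; simp [pvDiffs]
  | cons b rest' ih =>
    intro prev
    have hlen : (prev :: b :: rest').length - 1 = rest'.length + 1 := by simp
    rw [hlen, List.range_succ_eq_map, List.map_cons, List.map_map]
    have hfun : ((fun j => (prev :: b :: rest').getD (j + 1) 0 - (prev :: b :: rest').getD j 0) ∘ Nat.succ)
        = (fun j => (b :: rest').getD (j + 1) 0 - (b :: rest').getD j 0) := by
      funext j
      simp [Function.comp]
    rw [hfun]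
    have := ih b
    have hl : (b :: rest').length - 1 = rest'.length := by simp
    rw [hl] at this
    rw [this]
    simp [pvDiffs]

-- ===== VERDICT (by name: the statement is the Claim_ definition above) =====
theorem solution_spec : Claim_equal_solution := by
  intro progresses speeds _ _
  unfold Spec_solution solution solution_alt
  cases hd : pvDays progresses speeds with
  | nil => simp [pvLoopA]
  | cons d rest =>
    simp only [if_neg (List.cons_ne_nil d rest)]
    rw [pvLoopA_eq_grp]
    have hgrp := pvGrp_eq_diffs (d :: rest) 0 0 (List.cons_ne_nil d rest)
    simp only [sub_zero, zero_add] at hgrp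
    simp only [List.length_nil, Nat.cast_zero, List.nil_append]
    rw [hgrp]
    have hasc' : (List.range ((d :: rest).length - 1)).filterMap (fun i =>
        if (d :: rest).getD i 0 < (d :: rest).getD (i + 1) 0 then some ((i : Int) + 1) else none)
        = pvAsc 0 (d :: rest) := by
      rw [← pvAsc_bridge (d :: rest) 0]
      congr 1; funext i; split_ifs <;> simp
    rw [hasc']
    simp only [List.cons_append]
    exact (pvDiffs_bridge (pvAsc 0 (d :: rest) ++ [(((d :: rest).length : Nat) : Int)]) 0).symm
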